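-- pv_equiv track=rewrite | github.com/mathematiguy/comp-599-assignment-2 | code.py | cbow_preprocessing
-- ===== SOURCE A (Python) =====
-- def build_current_surrounding_pairs(indices: "list[int]", window_size: int = 2):
--     """
--     Given a list of indices, this produces the following:
--         - surrounding_indices: a list of context windows for each index
--         - current_indices: the centre of each context window
--
--     Each context window has constant width of 2 * window_size.
--     Windows at the beginning or end are dropped to ensure this is the case.
--     """
--     # Drop start + end tokens
--     current_indices = indices[window_size:-window_size]
--
--     surrounding_indices = [
--         indices[i - window_size : i] + indices[i + 1 : i + window_size + 1]
--         for i, cur in enumerate(indices)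
--     ][window_size:-window_size]
--
--     return surrounding_indices, current_indices
--
-- def cbow_preprocessing(indices_list: "list[list[int]]", window_size: int = 2):
--
--     sources = []
--     targets = []
--     for indices in indices_list:
--         surrounding, current = build_current_surrounding_pairs(indices, window_size)
--         sources += surrounding
--         targets += current
--
--     return sources, targets
-- ===== SOURCE B (Python) =====
-- def cbow_preprocessing(indices_list: "list[list[int]]", window_size: int = 2):
--     sources = []
--     targets = []
--     if window_size <= 0:
--         return sources, targets
--     for indices in indices_list:
--         lo, hi = window_size, len(indices) - window_size
--         if hi <= lo:
--             continue  # no token has a full window on both sides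
--         offsets = list(range(-window_size, 0)) + list(range(1, window_size + 1))
--         targets += indices[lo:hi]
--         columns = [indices[lo + o:hi + o] for o in offsets]
--         sources += [list(row) for row in zip(*columns)]
--     return sources, targets
-- ===== Notes on version B (the rewrite author's own statement) =====
-- stated objective: faster
-- what changed: B replaces A's build-a-window-per-token-then-slice-off-the-edges comprehension with a shifted-columns scheme: per sublist it takes 2*window_size shifted bulk slices and zips (transposes) them into the context rows, never materialising per-token windows or the discarded edge windows.
-- outside the precondition, e.g. on cbow_preprocessing([[1]], -1): A returns ([[]], [1]), B returns ([], []); on cbow_preprocessing([[1, 2, 3]], -2): A returns ([[]], [2]), B returns ([], [])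
import Mathlib
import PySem

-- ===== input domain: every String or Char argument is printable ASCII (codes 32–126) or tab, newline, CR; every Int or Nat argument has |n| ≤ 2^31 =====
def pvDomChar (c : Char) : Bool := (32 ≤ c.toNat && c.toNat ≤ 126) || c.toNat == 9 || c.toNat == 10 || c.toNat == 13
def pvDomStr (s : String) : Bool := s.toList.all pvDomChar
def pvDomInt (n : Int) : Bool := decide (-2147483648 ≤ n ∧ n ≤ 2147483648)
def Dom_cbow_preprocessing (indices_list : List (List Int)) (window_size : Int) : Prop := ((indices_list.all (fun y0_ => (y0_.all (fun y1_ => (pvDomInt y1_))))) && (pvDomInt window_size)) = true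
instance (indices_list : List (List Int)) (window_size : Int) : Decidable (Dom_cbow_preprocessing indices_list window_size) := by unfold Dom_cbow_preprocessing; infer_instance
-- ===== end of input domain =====

-- B replaces the per-center window building with a shifted-columns + transpose (zip) scheme:
-- it slices 2*window_size shifted copies of each sublist once and zips them into the context
-- rows; for window_size ≤ 0 it naturally returns no pairs (window_size < 0 lies outside Pre_).

-- ===== PORT A =====
-- literal port of build_current_surrounding_pairs
def build_current_surrounding_pairs (indices : List Int) (window_size : Int) :
    List (List Int) × List Int :=
  -- current_indices = indices[window_size:-window_size]
  let current := PySem.List.slice indices (some window_size) (some (-window_size))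
  -- [indices[i-ws:i] + indices[i+1:i+ws+1] for i, cur in enumerate(indices)][ws:-ws]
  let surrounding := PySem.List.slice
    ((PySem.List.enumerate indices).map (fun p =>
      PySem.List.slice indices (some (p.1 - window_size)) (some p.1) ++
      PySem.List.slice indices (some (p.1 + 1)) (some (p.1 + window_size + 1))))
    (some window_size) (some (-window_size))
  (surrounding, current)

def cbow_preprocessing (indices_list : List (List Int)) (window_size : Int) :
    List (List Int) × List Int :=
  indices_list.foldl (fun acc indices =>
    let sc := build_current_surrounding_pairs indices window_size
    (acc.1 ++ sc.1, acc.2 ++ sc.2)) ([], [])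

-- ===== PORT B =====
-- zip(*columns): truncate to the shortest column, exactly as Python's zip does
def pvZipGo : List Int → List (List Int) → List (List Int)
  | [], _ => []
  | x :: xs, cs =>
      if cs.all (fun c => !c.isEmpty) then
        (x :: cs.map (fun c => c.headD 0)) :: pvZipGo xs (cs.map List.tail)
      else []

def pvZipStar : List (List Int) → List (List Int)
  | [] => []
  | c :: cs => pvZipGo c cs

def cbow_preprocessing_alt (indices_list : List (List Int)) (window_size : Int) :
    List (List Int) × List Int :=
  if window_size ≤ 0 then ([], [])
  else
    indices_list.foldl (fun acc indices =>
      -- lo, hi = window_size, len(indices) - window_size; skip if hi <= lo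
      if (indices.length : Int) - window_size ≤ window_size then acc
      else
        -- offsets = list(range(-ws, 0)) + list(range(1, ws + 1))
        (acc.1 ++ pvZipStar (((PySem.List.pyRange (-window_size) 0 1 ++
            PySem.List.pyRange 1 (window_size + 1) 1)).map (fun o =>
            PySem.List.slice indices (some (window_size + o))
              (some ((indices.length : Int) - window_size + o)))),
         acc.2 ++ PySem.List.slice indices (some window_size)
           (some ((indices.length : Int) - window_size)))) ([], [])

-- ===== PRECONDITION & SPEC =====
-- Pre_ excludes window_size < 0, a corner the function's contract (full context windows of
-- width 2*window_size) leaves unspecified: there A's negative slice bounds wrap and can return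
-- leftover window fragments and centers, while B naturally returns no pairs; neither value is
-- specified, so those inputs are excluded. (At window_size = 0, inside Pre_, both return no pairs.)
def Pre_cbow_preprocessing (indices_list : List (List Int)) (window_size : Int) : Prop :=
  0 ≤ window_size
instance (indices_list : List (List Int)) (window_size : Int) : Decidable (Pre_cbow_preprocessing indices_list window_size) := by unfold Pre_cbow_preprocessing; infer_instance

def pvWitness_cbow_preprocessing : List (List Int) × Int := ([[1, 2, 3, 4, 5]], 2)

def Spec_cbow_preprocessing (indices_list : List (List Int)) (window_size : Int) (out : List (List Int) × List Int) : Prop := out = cbow_preprocessing_alt indices_list window_size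
instance (indices_list : List (List Int)) (window_size : Int) (out : List (List Int) × List Int) : Decidable (Spec_cbow_preprocessing indices_list window_size out) := by unfold Spec_cbow_preprocessing; infer_instance

-- ===== CLAIM (what is proved, stated in full; the proofs are below) =====
def Claim_equal_cbow_preprocessing : Prop := ∀ (indices_list : List (List Int)) (window_size : Int), Dom_cbow_preprocessing indices_list window_size → Pre_cbow_preprocessing indices_list window_size → Spec_cbow_preprocessing indices_list window_size (cbow_preprocessing indices_list window_size)

-- ===== LEMMAS AND PROOFS =====

-- xs[ws:-ws] is empty when ws ≤ 0 and the list is empty or has length ≥ 2*(-ws)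
theorem sliceWin_nil {α : Type} (xs : List α) (ws : Int) (h : ws ≤ 0)
    (h2 : xs.length = 0 ∨ 2 * (-ws) ≤ (xs.length : Int)) :
    PySem.List.slice xs (some ws) (some (-ws)) = [] := by
  rw [← List.length_eq_zero_iff, PySem.List.length_slice]
  simp only [PySem.List.clampIdx]
  split_ifs <;> omega

-- xs[ws:-ws] for ws ≥ 1 is exactly the elements at the valid centers
theorem sliceWin_map {α : Type} (xs : List α) (d : α) (ws : Int) (h : 1 ≤ ws) :
    PySem.List.slice xs (some ws) (some (-ws)) =
      (PySem.List.pyRange ws ((xs.length : Int) - ws) 1).map (fun i => PySem.List.pyGetD xs i d) := by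
  by_cases hn : 2 * ws ≤ (xs.length : Int)
  · have hmap := PySem.List.map_pyGetD_pyRange xs d (a := ws) (by omega)
    rw [show PySem.List.len xs = (xs.length : Int) from by simp [PySem.List.len_eq],
        PySem.List.pyRange_one_append ws ((xs.length : Int) - ws) (xs.length : Int) (by omega) (by omega),
        List.map_append] at hmap
    have hlen : ((PySem.List.pyRange ws ((xs.length : Int) - ws) 1).map
        (fun i => PySem.List.pyGetD xs i d)).length = ((xs.length : Int) - ws - ws).toNat := by
      rw [List.length_map, PySem.List.length_pyRange_one]
    have htake := congrArg (List.take (((xs.length : Int) - ws - ws).toNat)) hmap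
    rw [← hlen, List.take_left] at htake
    rw [htake]
    simp only [PySem.List.slice, PySem.List.clampIdx]
    split_ifs
    all_goals try omega
    all_goals (congr 1 <;> try omega)
    all_goals (congr 1 <;> omega)
  · rw [PySem.List.pyRange_one_eq_nil (by omega), List.map_nil,
        ← List.length_eq_zero_iff, PySem.List.length_slice]
    simp only [PySem.List.clampIdx]
    split_ifs <;> omega

-- an in-bounds slice is the map of pyGetD over the index range
theorem slice_as_map {α : Type} (l : List α) (d : α) (a b : Int) (ha : 0 ≤ a) (hab : a ≤ b)
    (hb : b ≤ (l.length : Int)) :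
    PySem.List.slice l (some a) (some b) =
      (PySem.List.pyRange a b 1).map (fun j => PySem.List.pyGetD l j d) := by
  have hmap := PySem.List.map_pyGetD_pyRange l d (a := a) ha
  rw [show PySem.List.len l = (l.length : Int) from by simp [PySem.List.len_eq],
      PySem.List.pyRange_one_append a b (l.length : Int) hab hb, List.map_append] at hmap
  have hlen : ((PySem.List.pyRange a b 1).map (fun j => PySem.List.pyGetD l j d)).length
      = (b - a).toNat := by rw [List.length_map, PySem.List.length_pyRange_one]
  have htake := congrArg (List.take ((b - a).toNat)) hmap
  rw [← hlen, List.take_left] at htake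
  rw [htake, PySem.List.slice_toNat l ha (by omega)]
  congr 1
  omega

-- B's centers slice xs[ws:n-ws] equals the same map over valid centers (ws ≥ 1)
theorem sliceB_map {α : Type} (xs : List α) (d : α) (ws : Int) (h : 1 ≤ ws) :
    PySem.List.slice xs (some ws) (some ((xs.length : Int) - ws)) =
      (PySem.List.pyRange ws ((xs.length : Int) - ws) 1).map (fun i => PySem.List.pyGetD xs i d) := by
  by_cases hn : 2 * ws ≤ (xs.length : Int)
  · exact slice_as_map xs d ws ((xs.length : Int) - ws) (by omega) (by omega) (by omega)
  · rw [PySem.List.pyRange_one_eq_nil (by omega), List.map_nil,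
        ← List.length_eq_zero_iff, PySem.List.length_slice]
    simp only [PySem.List.clampIdx]
    split_ifs <;> omega

-- zip(*cols) is empty as soon as one column is empty
theorem pvZipGo_nil_mem (c : List Int) (cs : List (List Int))
    (h : c = [] ∨ [] ∈ cs) : pvZipGo c cs = [] := by
  cases c with
  | nil => rfl
  | cons x xs =>
      unfold pvZipGo
      rw [if_neg]
      simp only [List.all_eq_true, Bool.not_eq_eq_eq_not]
      intro hall
      rcases h with h | h
      · exact absurd h (by simp)
      · have := hall [] h
        simp at this

-- transpose of equal-length mapped columns
theorem pvZipGo_maps (m : Nat) (g : Int → Nat → Int) (o0 : Int) (os : List Int) :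
    pvZipGo ((List.range m).map (g o0)) (os.map (fun o => (List.range m).map (g o))) =
      (List.range m).map (fun i => g o0 i :: os.map (fun o => g o i)) := by
  induction m generalizing g with
  | zero => simp [pvZipGo]
  | succ m ih =>
      rw [List.range_succ_eq_map]
      simp only [List.map_cons, List.map_map]
      unfold pvZipGo
      rw [if_pos (by simp)]
      have htl := ih (fun o i => g o (i + 1))
      congr 1
      · simp [List.map_map, Function.comp]
      · simp only [List.map_map, Function.comp_def, List.tail_cons, Nat.succ_eq_add_one]
        exact htl

-- the comprehension over enumerate(indices) only uses the index component
theorem windows_enum_eq (l : List Int) (ws : Int) :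
    ((PySem.List.enumerate l).map (fun p =>
      PySem.List.slice l (some (p.1 - ws)) (some p.1) ++
      PySem.List.slice l (some (p.1 + 1)) (some (p.1 + ws + 1)))) =
    (PySem.List.pyRange 0 (l.length : Int) 1).map (fun i =>
      PySem.List.slice l (some (i - ws)) (some i) ++
      PySem.List.slice l (some (i + 1)) (some (i + ws + 1))) := by
  rw [show (fun p : Int × Int =>
        PySem.List.slice l (some (p.1 - ws)) (some p.1) ++
        PySem.List.slice l (some (p.1 + 1)) (some (p.1 + ws + 1))) =
      (fun i : Int =>
        PySem.List.slice l (some (i - ws)) (some i) ++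
        PySem.List.slice l (some (i + 1)) (some (i + ws + 1))) ∘ (fun p => p.1) from rfl,
    ← List.map_map, PySem.List.map_fst_enumerate]
  simp

-- slicing [ws:-ws] from a list of n mapped values keeps exactly the mapped valid centers
theorem slice_map_range {α : Type} (n : Nat) (w : Int → α) (d : α) (ws : Int) (h : 1 ≤ ws) :
    PySem.List.slice ((PySem.List.pyRange 0 (n : Int) 1).map w) (some ws) (some (-ws)) =
      (PySem.List.pyRange ws ((n : Int) - ws) 1).map w := by
  have hl : (((PySem.List.pyRange 0 (n : Int) 1).map w).length : Int) = (n : Int) := by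
    simp [List.length_map, PySem.List.length_pyRange_one]
  rw [sliceWin_map _ d ws h, hl]
  refine List.map_congr_left fun i hi => ?_
  rw [PySem.List.mem_pyRange_one] at hi
  exact PySem.List.pyGetD_map_pyRange_of_nonneg w (n : Int) i d (by omega) (by omega)

-- A's per-sublist sources as a map over the valid centers
theorem buildA_sources (l : List Int) (ws : Int) (h : 1 ≤ ws) :
    (build_current_surrounding_pairs l ws).1 =
      (PySem.List.pyRange ws ((l.length : Int) - ws) 1).map (fun i =>
        PySem.List.slice l (some (i - ws)) (some i) ++
        PySem.List.slice l (some (i + 1)) (some (i + ws + 1))) := by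
  unfold build_current_surrounding_pairs
  simp only
  rw [windows_enum_eq]
  exact slice_map_range l.length _ [] ws h

-- B's sources for one sublist (ws ≥ 1) equal A's sources
theorem rows_eq (l : List Int) (ws : Int) (h : 1 ≤ ws) :
    pvZipStar ((PySem.List.pyRange (-ws) 0 1 ++ PySem.List.pyRange 1 (ws + 1) 1).map (fun o =>
        PySem.List.slice l (some (ws + o)) (some ((l.length : Int) - ws + o)))) =
      (build_current_surrounding_pairs l ws).1 := by
  have hoff : PySem.List.pyRange (-ws) 0 1 ++ PySem.List.pyRange 1 (ws + 1) 1 =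
      (-ws) :: (PySem.List.pyRange (-ws + 1) 0 1 ++ PySem.List.pyRange 1 (ws + 1) 1) := by
    rw [PySem.List.pyRange_one_cons (by omega)]; rfl
  set n : Int := (l.length : Int) with hn
  rw [buildA_sources l ws h]
  by_cases hbig : 2 * ws ≤ n
  · -- every column is a map of length m over the same index range; zip = transpose
    set m : Nat := (n - 2 * ws).toNat with hm
    set g : Int → Nat → Int := fun o i => PySem.List.pyGetD l (ws + o + (i : Int)) 0 with hg
    have hcol : ∀ o : Int, -ws ≤ o → o ≤ ws →
        PySem.List.slice l (some (ws + o)) (some (n - ws + o)) = (List.range m).map (g o) := by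
      intro o h1 h2
      rw [slice_as_map l 0 (ws + o) (n - ws + o) (by omega) (by omega) (by omega),
          PySem.List.pyRange_one, List.map_map,
          show (n - ws + o - (ws + o)).toNat = m from by omega]
      exact List.map_congr_left fun k _ => by simp [hg, Function.comp]
    rw [hoff, List.map_cons, hcol (-ws) (by omega) (by omega),
        show ((PySem.List.pyRange (-ws + 1) 0 1 ++ PySem.List.pyRange 1 (ws + 1) 1).map (fun o =>
          PySem.List.slice l (some (ws + o)) (some (n - ws + o)))) =
        ((PySem.List.pyRange (-ws + 1) 0 1 ++ PySem.List.pyRange 1 (ws + 1) 1).map (fun o =>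
          (List.range m).map (g o))) from
          List.map_congr_left fun o ho => by
            rcases List.mem_append.mp ho with ho | ho <;>
              (rw [PySem.List.mem_pyRange_one] at ho; exact hcol o (by omega) (by omega))]
    show pvZipGo _ _ = _
    rw [pvZipGo_maps m g (-ws) (PySem.List.pyRange (-ws + 1) 0 1 ++ PySem.List.pyRange 1 (ws + 1) 1)]
    rw [PySem.List.pyRange_one ws (n - ws), List.map_map,
        show (n - ws - ws).toNat = m from by omega]
    refine List.map_congr_left fun k hk => ?_
    rw [List.mem_range] at hk
    show g (-ws) k :: (PySem.List.pyRange (-ws + 1) 0 1 ++ PySem.List.pyRange 1 (ws + 1) 1).map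
        (fun o => g o k) =
      PySem.List.slice l (some (ws + (k : Int) - ws)) (some (ws + (k : Int))) ++
      PySem.List.slice l (some (ws + (k : Int) + 1)) (some (ws + (k : Int) + ws + 1))
    rw [show g (-ws) k :: (PySem.List.pyRange (-ws + 1) 0 1 ++ PySem.List.pyRange 1 (ws + 1) 1).map
          (fun o => g o k) =
        ((-ws) :: (PySem.List.pyRange (-ws + 1) 0 1 ++ PySem.List.pyRange 1 (ws + 1) 1)).map
          (fun o => g o k) from rfl,
        ← hoff, List.map_append]
    have e1 : PySem.List.slice l (some (ws + (k : Int) - ws)) (some (ws + (k : Int))) =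
        (PySem.List.pyRange (-ws) 0 1).map (fun o => g o k) := by
      rw [slice_as_map l 0 (ws + (k : Int) - ws) (ws + (k : Int)) (by omega) (by omega) (by omega),
          PySem.List.pyRange_one, PySem.List.pyRange_one, List.map_map, List.map_map,
          show (ws + (k : Int) - (ws + (k : Int) - ws)).toNat = (0 - -ws).toNat from by omega]
      refine List.map_congr_left fun j _ => ?_
      simp only [hg, Function.comp]
      congr 1
      omega
    have e2 : PySem.List.slice l (some (ws + (k : Int) + 1)) (some (ws + (k : Int) + ws + 1)) =
        (PySem.List.pyRange 1 (ws + 1) 1).map (fun o => g o k) := by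
      rw [slice_as_map l 0 (ws + (k : Int) + 1) (ws + (k : Int) + ws + 1) (by omega) (by omega) (by omega),
          PySem.List.pyRange_one, PySem.List.pyRange_one, List.map_map, List.map_map,
          show (ws + (k : Int) + ws + 1 - (ws + (k : Int) + 1)).toNat = (ws + 1 - 1).toNat from by omega]
      refine List.map_congr_left fun j _ => ?_
      simp only [hg, Function.comp]
      congr 1
      omega
    rw [e1, e2]
  · -- fewer than 2*ws tokens: no valid center; the o = ws column is empty, so zip is empty
    rw [PySem.List.pyRange_one_eq_nil (a := ws) (b := n - ws) (by omega), List.map_nil]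
    have hwcol : PySem.List.slice l (some (ws + ws)) (some (n - ws + ws)) = [] := by
      rw [← List.length_eq_zero_iff, PySem.List.length_slice]
      simp only [PySem.List.clampIdx]
      split_ifs <;> omega
    have hwmem : PySem.List.slice l (some (ws + ws)) (some (n - ws + ws)) ∈
        ((PySem.List.pyRange (-ws) 0 1 ++ PySem.List.pyRange 1 (ws + 1) 1).map (fun o =>
          PySem.List.slice l (some (ws + o)) (some (n - ws + o)))) :=
      List.mem_map_of_mem (by
        rw [List.mem_append, PySem.List.mem_pyRange_one, PySem.List.mem_pyRange_one]
        right; omega)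
    rw [hoff, List.map_cons] at hwmem ⊢
    show pvZipGo _ _ = _
    rcases List.mem_cons.mp hwmem with hhd | htl
    · rw [hhd] at hwcol
      exact pvZipGo_nil_mem _ _ (Or.inl hwcol)
    · exact pvZipGo_nil_mem _ _ (Or.inr (by rw [← hwcol]; exact htl))

-- A's per-sublist contribution is empty when no token has a full window on both sides
theorem buildA_small (l : List Int) (ws : Int) (h : 1 ≤ ws)
    (hsm : (l.length : Int) - ws ≤ ws) :
    build_current_surrounding_pairs l ws = ([], []) := by
  refine Prod.ext ?_ ?_
  · rw [buildA_sources l ws h, PySem.List.pyRange_one_eq_nil (by omega), List.map_nil]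
  · show PySem.List.slice l (some ws) (some (-ws)) = []
    rw [sliceWin_map l 0 ws h, PySem.List.pyRange_one_eq_nil (by omega), List.map_nil]

-- for ws ≥ 1, B's per-sublist step produces exactly A's per-sublist contribution
theorem step_eq (l : List Int) (ws : Int) (h : 1 ≤ ws) (acc : List (List Int) × List Int) :
    (if (l.length : Int) - ws ≤ ws then acc
     else
      (acc.1 ++ pvZipStar ((PySem.List.pyRange (-ws) 0 1 ++ PySem.List.pyRange 1 (ws + 1) 1).map (fun o =>
          PySem.List.slice l (some (ws + o)) (some ((l.length : Int) - ws + o)))),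
       acc.2 ++ PySem.List.slice l (some ws) (some ((l.length : Int) - ws)))) =
    (acc.1 ++ (build_current_surrounding_pairs l ws).1,
     acc.2 ++ (build_current_surrounding_pairs l ws).2) := by
  by_cases hsm : (l.length : Int) - ws ≤ ws
  · rw [if_pos hsm, buildA_small l ws h hsm]
    simp
  · rw [if_neg hsm]
    refine Prod.ext ?_ ?_
    · simp only
      rw [rows_eq l ws h]
    · simp only
      rw [sliceB_map l 0 ws h]
      unfold build_current_surrounding_pairs
      simp only
      rw [sliceWin_map l 0 ws h]

-- per-sublist contributions of A are empty when ws ≤ 0 and the sublist is outside D_'s shape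
theorem build_nil (l : List Int) (ws : Int) (hws : ws ≤ 0)
    (h2 : l.length = 0 ∨ 2 * (-ws) ≤ (l.length : Int)) :
    build_current_surrounding_pairs l ws = ([], []) := by
  unfold build_current_surrounding_pairs
  simp only [Prod.mk.injEq]
  refine ⟨sliceWin_nil _ _ hws ?_, sliceWin_nil _ _ hws h2⟩
  rw [List.length_map, PySem.List.length_enumerate]
  exact h2

theorem foldl_skip (L : List (List Int)) (ws : Int) (hws : ws ≤ 0)
    (hall : ∀ l ∈ L, l.length = 0 ∨ 2 * (-ws) ≤ (l.length : Int)) :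
    ∀ acc : List (List Int) × List Int,
      L.foldl (fun acc indices =>
        let sc := build_current_surrounding_pairs indices ws
        (acc.1 ++ sc.1, acc.2 ++ sc.2)) acc = acc := by
  induction L with
  | nil => intro acc; rfl
  | cons x t ih =>
      intro acc
      have hx := build_nil x ws hws (hall x (by simp))
      simp only [List.foldl_cons, hx, List.append_nil]
      exact ih (fun l hl => hall l (by simp [hl])) acc

-- ===== VERDICT =====
theorem cbow_preprocessing_spec : Claim_equal_cbow_preprocessing := by
  intro L ws _ hpre
  unfold Spec_cbow_preprocessing
  by_cases hws : ws ≤ 0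
  · unfold cbow_preprocessing_alt
    rw [if_pos hws]
    have h0 : ws = 0 := le_antisymm hws hpre
    have hall : ∀ l ∈ L, l.length = 0 ∨ 2 * (-ws) ≤ (l.length : Int) := by
      intro l _
      right
      omega
    exact foldl_skip L ws hws hall ([], [])
  · unfold cbow_preprocessing cbow_preprocessing_alt
    rw [if_neg hws]
    refine PySem.List.foldl_congr_mem L _ _ ([], []) ?_
    intro acc x _
    exact (step_eq x ws (by omega) acc).symm
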